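-- pv_equiv track=rewrite | github.com/paul-heyse/CodeIntel | tools/check_layering.py | classify_module
-- ===== SOURCE A (Python) =====
-- from typing import Final
--
-- LAYER_FOR_PREFIX: Final = {
--     "codeintel.config.builder": "app",
--     "codeintel.config.models": "app",
--     "codeintel.config.serving_models": "app",
--     "codeintel.config.primitives": "core",
--     "codeintel.config.schemas": "core",
--     "codeintel.config": "core",
--     "codeintel.storage": "core",
--     "codeintel.ingestion": "domain",
--     "codeintel.analytics": "domain",
--     "codeintel.graphs": "domain",
--     "codeintel.pipeline": "app",
--     "codeintel.serving": "app",
--     "codeintel.cli": "app",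
-- }
--
-- def classify_module(module: str) -> str | None:
--     """
--     Return the configured layer for a module path when known.
--
--     Parameters
--     ----------
--     module : str
--         Fully qualified module name.
--
--     Returns
--     -------
--     str | None
--         Layer label when mapped, otherwise None.
--     """
--     best: tuple[str, str] | None = None
--     for prefix, layer in LAYER_FOR_PREFIX.items():
--         is_match = module == prefix or module.startswith(prefix + ".")
--         is_longer = best is None or len(prefix) > len(best[0])
--         if is_match and is_longer:
--             best = (prefix, layer)
--     return best[1] if best is not None else None
-- ===== SOURCE B (Python) =====
-- from typing import Final
--
-- LAYER_FOR_PREFIX: Final = {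
--     "codeintel.config.builder": "app",
--     "codeintel.config.models": "app",
--     "codeintel.config.serving_models": "app",
--     "codeintel.config.primitives": "core",
--     "codeintel.config.schemas": "core",
--     "codeintel.config": "core",
--     "codeintel.storage": "core",
--     "codeintel.ingestion": "domain",
--     "codeintel.analytics": "domain",
--     "codeintel.graphs": "domain",
--     "codeintel.pipeline": "app",
--     "codeintel.serving": "app",
--     "codeintel.cli": "app",
-- }
--
--
-- def classify_module(module: str) -> str | None:
--     """Return the layer of the longest matching prefix via direct dict lookups.
--
--     Walks the module's own dotted prefixes from longest to shortest, so no
--     scan over all table entries is needed.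
--     """
--     candidate = module
--     while True:
--         layer = LAYER_FOR_PREFIX.get(candidate)
--         if layer is not None:
--             return layer
--         head, sep, _ = candidate.rpartition(".")
--         if not sep:
--             return None
--         candidate = head
-- ===== Notes on version B (the rewrite author's own statement) =====
-- stated objective: simpler
-- what changed: Instead of scanning every table entry while tracking the longest matching prefix, B walks the module's own dotted prefixes from longest to shortest (rpartition chops) and returns the first direct dict hit.
import Mathlib
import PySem

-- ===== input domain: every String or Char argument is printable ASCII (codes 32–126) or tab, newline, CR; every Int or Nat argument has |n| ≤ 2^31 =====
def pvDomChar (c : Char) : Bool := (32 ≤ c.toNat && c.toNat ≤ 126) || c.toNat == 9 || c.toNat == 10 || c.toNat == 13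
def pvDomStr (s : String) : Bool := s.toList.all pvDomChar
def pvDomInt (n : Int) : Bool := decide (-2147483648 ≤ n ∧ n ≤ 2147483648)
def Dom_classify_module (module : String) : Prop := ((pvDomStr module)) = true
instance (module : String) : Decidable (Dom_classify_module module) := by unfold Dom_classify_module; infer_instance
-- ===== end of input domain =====

-- B replaces A's scan over every table entry (tracking the longest match) by a walk over the
-- module's own dotted prefixes, longest first, with a direct dict lookup each (objective: simpler).

def LAYER_FOR_PREFIX : PySem.Dict String String := ⟨[
  ("codeintel.config.builder", "app"),
  ("codeintel.config.models", "app"),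
  ("codeintel.config.serving_models", "app"),
  ("codeintel.config.primitives", "core"),
  ("codeintel.config.schemas", "core"),
  ("codeintel.config", "core"),
  ("codeintel.storage", "core"),
  ("codeintel.ingestion", "domain"),
  ("codeintel.analytics", "domain"),
  ("codeintel.graphs", "domain"),
  ("codeintel.pipeline", "app"),
  ("codeintel.serving", "app"),
  ("codeintel.cli", "app")]⟩

-- ===== PORT A =====
def classify_module (module : String) : Option String :=
  let best := LAYER_FOR_PREFIX.items.foldl
    (fun best pl =>
      let is_match := (module == pl.1) || PySem.Str.startswith module (pl.1 ++ ".")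
      let is_longer := match best with
        | none => true
        | some b => decide (PySem.Str.len b.1 < PySem.Str.len pl.1)
      if is_match && is_longer then some pl else best)
    none
  match best with
  | some b => some b.2
  | none => none

-- ===== PORT B =====
-- hand port of `cand.rpartition(".")` reduced to what B uses: `some head` (the part before the
-- LAST '.') when '.' occurs, `none` when it does not (Python's sep == "").  Exact for the
-- one-character separator '.'.
def rpartDotHead : List Char → Option (List Char)
  | [] => none
  | c :: cs =>
    match rpartDotHead cs with
    | some r => some (c :: r)
    | none => if c = '.' then some [] else none

-- termination measure for the loop below (cited in decreasing_by)
theorem rpartDotHead_length : ∀ (cs r : List Char), rpartDotHead cs = some r → r.length < cs.length := by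
  intro cs
  induction cs with
  | nil => intro r h; simp [rpartDotHead] at h
  | cons c cs ih =>
    intro r h
    simp only [rpartDotHead] at h
    cases hr : rpartDotHead cs with
    | some r' =>
      rw [hr] at h
      cases h
      have := ih r' hr
      simp; omega
    | none =>
      rw [hr] at h
      by_cases hc : c = '.'
      · rw [if_pos hc] at h; cases h; simp
      · rw [if_neg hc] at h; cases h

-- the `while True` loop of B: look the candidate up, else chop at the last dot
def classify_module_alt_go (cand : List Char) : Option String :=
  match LAYER_FOR_PREFIX.get? (String.ofList cand) with
  | some layer => some layer
  | none =>
    match h : rpartDotHead cand with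
    | some head => classify_module_alt_go head
    | none => none
termination_by cand.length
decreasing_by exact rpartDotHead_length _ _ h

def classify_module_alt (module : String) : Option String :=
  classify_module_alt_go module.toList

-- ===== PRECONDITION & SPEC =====
def Spec_classify_module (module : String) (out : Option String) : Prop := out = classify_module_alt module
instance (module : String) (out : Option String) : Decidable (Spec_classify_module module out) := by unfold Spec_classify_module; infer_instance

-- ===== CLAIM (what is proved, stated in full; the proofs are below) =====
def Claim_equal_classify_module : Prop := ∀ (module : String), Dom_classify_module module → Spec_classify_module module (classify_module module)

-- ===== LEMMAS AND PROOFS =====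

-- "prefix p matches module m" (on char lists): Python's  m == p or m.startswith(p + ".")
def MatchL (m c : List Char) : Prop := c = m ∨ c ++ ['.'] <+: m

-- A's loop body, named so the fold lemmas can speak about it
def stepA (module : String) (best : Option (String × String)) (pl : String × String) :
    Option (String × String) :=
  let is_match := (module == pl.1) || PySem.Str.startswith module (pl.1 ++ ".")
  let is_longer := match best with
    | none => true
    | some b => decide (PySem.Str.len b.1 < PySem.Str.len pl.1)
  if is_match && is_longer then some pl else best

theorem classify_module_def (module : String) :
    classify_module module =
      match LAYER_FOR_PREFIX.items.foldl (stepA module) none with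
      | some b => some b.2
      | none => none := rfl

theorem match_bool_iff (module p : String) :
    ((module == p) || PySem.Str.startswith module (p ++ ".")) = true ↔
      MatchL module.toList p.toList := by
  have hdot : ("." : String).toList = ['.'] := rfl
  simp only [Bool.or_eq_true, beq_iff_eq, PySem.Str.startswith_eq, PySem.Chars.startswith_iff,
    String.toList_append, hdot, MatchL]
  constructor
  · rintro (h | h)
    · exact Or.inl (by rw [h])
    · exact Or.inr h
  · rintro (h | h)
    · exact Or.inl (String.toList_inj.mp h.symm)
    · exact Or.inr h

theorem stepA_cases (module : String) (b : Option (String × String)) (x : String × String) :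
    stepA module b x = b ∨
      (stepA module b x = some x ∧ MatchL module.toList x.1.toList) := by
  simp only [stepA]
  split_ifs with hif
  · rw [Bool.and_eq_true] at hif
    exact Or.inr ⟨rfl, (match_bool_iff module x.1).mp hif.1⟩
  · exact Or.inl rfl

theorem stepA_of_not_match (module : String) (b : Option (String × String)) (x : String × String)
    (h : ¬ MatchL module.toList x.1.toList) : stepA module b x = b := by
  rcases stepA_cases module b x with h1 | h1
  · exact h1
  · exact absurd h1.2 h

theorem stepA_keep (module : String) (p : String) (lp : String) (x : String × String)
    (h : MatchL module.toList x.1.toList → x.1.toList.length ≤ p.toList.length) :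
    stepA module (some (p, lp)) x = some (p, lp) := by
  simp only [stepA]
  split_ifs with hif
  · rw [Bool.and_eq_true] at hif
    have hm := (match_bool_iff module x.1).mp hif.1
    have hlen := h hm
    have hlt := of_decide_eq_true hif.2
    rw [PySem.Str.len_eq, PySem.Str.len_eq] at hlt
    exact absurd hlt (by exact_mod_cast Nat.not_lt.mpr hlen)
  · rfl

theorem stepA_take (module : String) (b : Option (String × String)) (x : String × String)
    (hm : MatchL module.toList x.1.toList)
    (hb : b = none ∨ ∃ p lp, b = some (p, lp) ∧ p.toList.length < x.1.toList.length) :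
    stepA module b x = some x := by
  simp only [stepA]
  rw [if_pos]
  rw [Bool.and_eq_true]
  refine ⟨(match_bool_iff module x.1).mpr hm, ?_⟩
  rcases hb with hb | ⟨p, lp, hb, hlt⟩
  · rw [hb]
  · rw [hb]
    simp only [decide_eq_true_eq, PySem.Str.len_eq]
    exact_mod_cast hlt

theorem foldA_skip (module : String) :
    ∀ (L : List (String × String)) (b : Option (String × String)),
      (∀ q l', (q, l') ∈ L → ¬ MatchL module.toList q.toList) →
      L.foldl (stepA module) b = b := by
  intro L
  induction L with
  | nil => intro b _; rfl
  | cons x L ih =>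
    intro b h
    rw [List.foldl_cons, stepA_of_not_match module b x (h x.1 x.2 (by simp))]
    exact ih b fun q l' hq => h q l' (List.mem_cons_of_mem _ hq)

theorem foldA_keep (module : String) (p lp : String) :
    ∀ (L : List (String × String)),
      (∀ q l', (q, l') ∈ L → MatchL module.toList q.toList → q.toList.length ≤ p.toList.length) →
      L.foldl (stepA module) (some (p, lp)) = some (p, lp) := by
  intro L
  induction L with
  | nil => intro _; rfl
  | cons x L ih =>
    intro h
    rw [List.foldl_cons, stepA_keep module p lp x (h x.1 x.2 (by simp))]
    exact ih fun q l' hq => h q l' (List.mem_cons_of_mem _ hq)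

theorem foldA_max (module : String) (c l : String) :
    ∀ (L : List (String × String)) (b : Option (String × String)),
      (c, l) ∈ L → MatchL module.toList c.toList →
      (∀ q l', (q, l') ∈ L → MatchL module.toList q.toList →
        q = c ∨ q.toList.length < c.toList.length) →
      (L.map Prod.fst).Nodup →
      (b = none ∨ ∃ p lp, b = some (p, lp) ∧ p.toList.length < c.toList.length) →
      L.foldl (stepA module) b = some (c, l) := by
  intro L
  induction L with
  | nil => intro b hmem; exact absurd hmem (List.not_mem_nil)
  | cons x L ih =>
    intro b hmem hc hall hnd hb
    rw [List.map_cons, List.nodup_cons] at hnd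
    rcases List.mem_cons.mp hmem with heq | hmem'
    · subst heq
      rw [List.foldl_cons, stepA_take module b (c, l) hc hb]
      apply foldA_keep
      intro q l' hq hmq
      rcases hall q l' (List.mem_cons_of_mem _ hq) hmq with rfl | hlt
      · exact absurd (List.mem_map.mpr ⟨(q, l'), hq, rfl⟩) hnd.1
      · exact Nat.le_of_lt hlt
    · rw [List.foldl_cons]
      apply ih (stepA module b x) hmem' hc
        (fun q l' hq => hall q l' (List.mem_cons_of_mem _ hq)) hnd.2
      rcases stepA_cases module b x with h1 | ⟨h1, hmx⟩
      · rw [h1]; exact hb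
      · rcases hall x.1 x.2 (by simp) hmx with hx | hx
        · exact absurd (List.mem_map.mpr ⟨(c, l), hmem', hx.symm⟩) hnd.1
        · exact Or.inr ⟨x.1, x.2, by rw [h1], hx⟩

-- classify_module's value when nothing matches / when c is the strictly longest match
theorem nodup_keys : (LAYER_FOR_PREFIX.items.map Prod.fst).Nodup := by decide

theorem classify_eq_none (module : String)
    (h : ∀ q l', (q, l') ∈ LAYER_FOR_PREFIX.items → ¬ MatchL module.toList q.toList) :
    classify_module module = none := by
  rw [classify_module_def, foldA_skip module _ none h]

theorem classify_eq_some (module : String) (c l : String)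
    (hmem : (c, l) ∈ LAYER_FOR_PREFIX.items) (hc : MatchL module.toList c.toList)
    (hall : ∀ q l', (q, l') ∈ LAYER_FOR_PREFIX.items → MatchL module.toList q.toList →
      q = c ∨ q.toList.length < c.toList.length) :
    classify_module module = some l := by
  rw [classify_module_def, foldA_max module c l _ none hmem hc hall nodup_keys (Or.inl rfl)]

-- ---- facts about rpartDotHead ----
theorem rpartDotHead_none : ∀ (cs : List Char), rpartDotHead cs = none → '.' ∉ cs := by
  intro cs
  induction cs with
  | nil => intro _; simp
  | cons c cs ih =>
    intro h
    simp only [rpartDotHead] at h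
    cases hr : rpartDotHead cs with
    | some r' => rw [hr] at h; cases h
    | none =>
      rw [hr] at h
      by_cases hc : c = '.'
      · rw [if_pos hc] at h; cases h
      · rw [if_neg hc] at h
        simp only [List.mem_cons, not_or]
        exact ⟨fun hx => hc hx.symm, ih hr⟩

theorem rpartDotHead_some :
    ∀ (cs r : List Char), rpartDotHead cs = some r → ∃ t, cs = r ++ '.' :: t ∧ '.' ∉ t := by
  intro cs
  induction cs with
  | nil => intro r h; simp [rpartDotHead] at h
  | cons c cs ih =>
    intro r h
    simp only [rpartDotHead] at h
    cases hr : rpartDotHead cs with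
    | some r' =>
      rw [hr] at h
      cases h
      obtain ⟨t, ht, hnd⟩ := ih r' hr
      exact ⟨t, by rw [List.cons_append, ht], hnd⟩
    | none =>
      rw [hr] at h
      by_cases hc : c = '.'
      · rw [if_pos hc] at h
        cases h
        exact ⟨cs, by rw [hc, List.nil_append], rpartDotHead_none cs hr⟩
      · rw [if_neg hc] at h; cases h

-- a dotted prefix never reaches past the LAST dot
theorem lastDot_ge (h t q : List Char) (hnd : '.' ∉ t) (hq : q ++ ['.'] <+: h ++ '.' :: t) :
    q.length ≤ h.length := by
  by_contra hlt
  have hlen : h.length < q.length := Nat.lt_of_not_le hlt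
  obtain ⟨s2, hs2⟩ := hq
  have e1 : ((q ++ ['.']) ++ s2)[q.length]? = some '.' := by
    rw [List.getElem?_append_left (by simp : q.length < (q ++ ['.']).length)]
    simp
  rw [hs2, List.getElem?_append_right (Nat.le_of_lt hlen)] at e1
  obtain ⟨k, hk⟩ : ∃ k, q.length - h.length = k + 1 := ⟨q.length - h.length - 1, by omega⟩
  rw [hk, List.getElem?_cons_succ] at e1
  exact hnd (List.mem_of_getElem? e1)

theorem prefix_eq_of_len_eq {l1 l2 l : List Char} (h1 : l1 <+: l) (h2 : l2 <+: l)
    (h : l1.length = l2.length) : l1 = l2 := by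
  rw [List.prefix_iff_eq_take] at h1 h2
  rw [h1, h2, h]

theorem matchL_prefix {m c : List Char} (h : MatchL m c) : c <+: m := by
  rcases h with rfl | h
  · exact List.prefix_refl _
  · exact ((List.prefix_append c ['.']).trans h)

-- unfolding equations for the loop
theorem alt_go_found (c : List Char) (l : String)
    (h : LAYER_FOR_PREFIX.get? (String.ofList c) = some l) :
    classify_module_alt_go c = some l := by
  conv_lhs => unfold classify_module_alt_go
  rw [h]

theorem alt_go_chop (c head : List Char)
    (h1 : LAYER_FOR_PREFIX.get? (String.ofList c) = none)
    (h2 : rpartDotHead c = some head) :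
    classify_module_alt_go c = classify_module_alt_go head := by
  conv_lhs => unfold classify_module_alt_go
  rw [h1]
  split
  · next heq => simp at heq
  · split
    · next heq => rw [h2] at heq; cases heq; rfl
    · next heq => rw [h2] at heq; cases heq

theorem alt_go_stop (c : List Char)
    (h1 : LAYER_FOR_PREFIX.get? (String.ofList c) = none)
    (h2 : rpartDotHead c = none) :
    classify_module_alt_go c = none := by
  conv_lhs => unfold classify_module_alt_go
  rw [h1]
  split
  · next heq => simp at heq
  · split
    · next heq => rw [h2] at heq; cases heq
    · rfl

theorem keys_nodup : LAYER_FOR_PREFIX.keys.Nodup := by decide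

theorem mem_keys_of_mem_items (q l' : String) (h : (q, l') ∈ LAYER_FOR_PREFIX.items) :
    q ∈ LAYER_FOR_PREFIX.keys := by
  fin_cases h <;> decide

-- ---- the main loop invariant: goB's candidate dominates every matching table key ----
theorem goB_eq_classify (m : String) :
    ∀ (n : Nat) (c : List Char), c.length < n →
      MatchL m.toList c →
      (∀ q l', (q, l') ∈ LAYER_FOR_PREFIX.items → MatchL m.toList q.toList → MatchL c q.toList) →
      classify_module_alt_go c = classify_module m := by
  intro n
  induction n with
  | zero => intro c hn; omega
  | succ n ih =>
    intro c hn hc hinv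
    cases hget : LAYER_FOR_PREFIX.get? (String.ofList c) with
    | some layer =>
      rw [alt_go_found c layer hget]
      refine (classify_eq_some m (String.ofList c) layer
        ((PySem.Dict.get?_eq_some_iff_mem_items _ _ _ keys_nodup).mp hget) ?_ ?_).symm
      · rw [String.toList_ofList]; exact hc
      · intro q l' hq hmq
        rcases hinv q l' hq hmq with hqc | hqp
        · exact Or.inl (String.toList_inj.mp (by rw [hqc, String.toList_ofList]))
        · refine Or.inr ?_
          rw [String.toList_ofList]
          have := hqp.length_le
          simp only [List.length_append, List.length_singleton] at this
          omega
    | none =>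
      have hnotkey : ∀ q l', (q, l') ∈ LAYER_FOR_PREFIX.items → q.toList ≠ c := by
        intro q l' hq hqc
        have : q = String.ofList c := String.toList_inj.mp (by rw [hqc, String.toList_ofList])
        exact ((PySem.Dict.get?_eq_none_iff_not_mem_keys _ _).mp hget)
          (this ▸ mem_keys_of_mem_items q l' hq)
      cases hrp : rpartDotHead c with
      | some head =>
        rw [alt_go_chop c head hget hrp]
        obtain ⟨t, hct, hnd⟩ := rpartDotHead_some c head hrp
        have hhead_pre : head ++ ['.'] <+: c := by
          rw [hct]
          exact ⟨t, by simp⟩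
        apply ih head
        · have := rpartDotHead_length c head hrp; omega
        · -- MatchL m head
          exact Or.inr (hhead_pre.trans (matchL_prefix hc))
        · intro q l' hq hmq
          rcases hinv q l' hq hmq with hqc | hqp
          · exact absurd hqc (hnotkey q l' hq)
          · have hle : q.toList.length ≤ head.length := lastDot_ge head t q.toList hnd (hct ▸ hqp)
            have hqpre : q.toList <+: c := (List.prefix_append q.toList ['.']).trans hqp
            have hhpre : head <+: c := (List.prefix_append head ['.']).trans hhead_pre
            rcases Nat.lt_or_ge q.toList.length head.length with hlt | hge
            · exact Or.inr (List.prefix_of_prefix_length_le hqp hhpre (by simp only [List.length_append, List.length_singleton]; omega))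
            · exact Or.inl (prefix_eq_of_len_eq hqpre hhpre (Nat.le_antisymm hle hge))
      | none =>
        rw [alt_go_stop c hget hrp]
        refine (classify_eq_none m ?_).symm
        intro q l' hq hmq
        rcases hinv q l' hq hmq with hqc | hqp
        · exact hnotkey q l' hq hqc
        · exact rpartDotHead_none c hrp (hqp.mem (by simp))

-- ===== VERDICT (by name: the statement is the Claim_ definition above) =====
theorem classify_module_spec : Claim_equal_classify_module := by
  intro module _
  unfold Spec_classify_module classify_module_alt
  exact (goB_eq_classify module (module.toList.length + 1) module.toList (by omega)
    (Or.inl rfl) (fun q l' _ hq => hq)).symm
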